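-- pv_equiv track=rewrite | github.com/Kaminarusawa-sekai/Flora | agent/agent_actor copy.py | _extract_relevant_subgraph
-- ===== SOURCE A (Python) =====
-- from typing import Dict, List, Any, Optional, Set, Callable, Tuple
--
-- def _extract_relevant_subgraph(start_cap: str, dependencies: List[Dict]) -> Set[str]:
--     from collections import defaultdict, deque
--     graph = defaultdict(list)
--     all_nodes = set()
--     for dep in dependencies:
--         graph[dep["from"]].append(dep["to"])
--         all_nodes.add(dep["from"])
--         all_nodes.add(dep["to"])
--     if start_cap not in all_nodes:
--         return {start_cap}
--     visited = set()
--     queue = deque([start_cap])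
--     visited.add(start_cap)
--     while queue:
--         node = queue.popleft()
--         for neighbor in graph[node]:
--             if neighbor not in visited:
--                 visited.add(neighbor)
--                 queue.append(neighbor)
--     return visited
-- ===== SOURCE B (Python) =====
-- # B: no adjacency dict, no all-nodes precheck, no deque: a growing worklist list
-- # scanned by index, with a full rescan of the dependency list per discovered node.
-- def _extract_relevant_subgraph(start_cap, dependencies):
--     reachable = [start_cap]
--     i = 0
--     while i < len(reachable):
--         node = reachable[i]
--         for dep in dependencies:
--             if dep["from"] == node and dep["to"] not in reachable:
--                 reachable.append(dep["to"])
--         i += 1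
--     return set(reachable)
-- ===== Notes on version B (the rewrite author's own statement) =====
-- stated objective: alternative
-- what changed: Replaced the adjacency-dict construction, all-nodes precheck and deque BFS with a single growing worklist list scanned by index that rescans the whole dependency list for each discovered node.
import Mathlib
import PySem

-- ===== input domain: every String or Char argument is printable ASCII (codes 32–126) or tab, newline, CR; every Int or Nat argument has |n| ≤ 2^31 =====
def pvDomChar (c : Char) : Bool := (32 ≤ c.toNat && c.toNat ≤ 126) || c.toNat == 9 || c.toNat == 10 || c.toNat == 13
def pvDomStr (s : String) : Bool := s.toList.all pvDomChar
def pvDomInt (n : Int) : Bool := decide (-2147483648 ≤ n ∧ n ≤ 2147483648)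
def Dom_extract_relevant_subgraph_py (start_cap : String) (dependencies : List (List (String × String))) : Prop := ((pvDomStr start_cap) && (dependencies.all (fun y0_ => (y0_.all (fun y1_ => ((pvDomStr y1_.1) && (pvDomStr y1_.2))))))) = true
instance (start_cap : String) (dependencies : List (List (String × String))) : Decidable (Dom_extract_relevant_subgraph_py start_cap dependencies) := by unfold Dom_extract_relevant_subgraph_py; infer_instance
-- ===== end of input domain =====

-- B replaces A's adjacency-dict + deque BFS by an index-scanned worklist that rescans
-- the dependency list per discovered node (objective: alternative, same return value).

-- shared accessor: dep["k"] on an association-list dict (first match; none = KeyError)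
def pvKey (dep : List (String × String)) (k : String) : Option String :=
  (PySem.Dict.mk dep).get? k

-- ===== PORT A =====
-- the build loop: graph (defaultdict(list)) and all_nodes
def pvBuild (dependencies : List (List (String × String))) :
    PySem.Dict String (List String) × PySem.Set String :=
  dependencies.foldl (fun acc dep =>
    match pvKey dep "from", pvKey dep "to" with
    | some f, some t =>
        (acc.1.modify f [] (· ++ [t]), PySem.Set.add (PySem.Set.add acc.2 f) t)
    | _, _ => acc)  -- KeyError in Python; unreachable under Pre_
    (PySem.Dict.empty, PySem.Set.empty)

-- the BFS while-loop; fuel only makes the recursion total (|deps|+1 iterations always suffice)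
def pvBfs (graph : PySem.Dict String (List String)) :
    Nat → PySem.Set String → List String → PySem.Set String
  | 0, visited, _ => visited
  | _, visited, [] => visited
  | fuel + 1, visited, node :: rest =>
      let st := (graph.getD node []).foldl
        (fun (st : PySem.Set String × List String) neighbor =>
          if neighbor ∈ st.1 then st else (PySem.Set.add st.1 neighbor, st.2 ++ [neighbor]))
        (visited, rest)
      pvBfs graph fuel st.1 st.2

def extract_relevant_subgraph_py (start_cap : String)
    (dependencies : List (List (String × String))) : List String :=
  let gb := pvBuild dependencies
  if start_cap ∈ gb.2 then
    pvBfs gb.1 (dependencies.length + 1) (PySem.Set.add PySem.Set.empty start_cap) [start_cap]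
  else
    PySem.Set.add PySem.Set.empty start_cap

-- ===== PORT B =====
-- the worklist while-loop; fuel only makes the recursion total (|deps|+1 iterations always suffice)
def pvScan (dependencies : List (List (String × String))) :
    Nat → List String → Nat → List String
  | 0, reachable, _ => reachable
  | fuel + 1, reachable, i =>
      if h : i < reachable.length then
        pvScan dependencies fuel
          (dependencies.foldl (fun acc dep =>
            match pvKey dep "from", pvKey dep "to" with
            | some f, some t => if f = reachable[i] ∧ t ∉ acc then acc ++ [t] else acc
            | _, _ => acc)  -- KeyError in Python; unreachable under Pre_
            reachable)
          (i + 1)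
      else reachable

def extract_relevant_subgraph_py_alt (start_cap : String)
    (dependencies : List (List (String × String))) : List String :=
  PySem.Set.ofList (pvScan dependencies (dependencies.length + 1) [start_cap] 0)

-- ===== PRECONDITION & SPEC =====
-- Pre_: every dependency dict has the keys "from" and "to"; on any other input the
-- Python A raises KeyError (returns nothing), so those inputs are excluded.
def Pre_extract_relevant_subgraph_py (start_cap : String)
    (dependencies : List (List (String × String))) : Prop :=
  ∀ dep ∈ dependencies,
    (PySem.Dict.mk dep).contains "from" = true ∧ (PySem.Dict.mk dep).contains "to" = true
instance (start_cap : String) (dependencies : List (List (String × String))) : Decidable (Pre_extract_relevant_subgraph_py start_cap dependencies) := by unfold Pre_extract_relevant_subgraph_py; infer_instance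

def pvWitness_extract_relevant_subgraph_py : String × (List (List (String × String))) :=
  ("a", [[("from", "a"), ("to", "b")], [("from", "b"), ("to", "c")]])

def Spec_extract_relevant_subgraph_py (start_cap : String) (dependencies : List (List (String × String))) (out : List String) : Prop := out = extract_relevant_subgraph_py_alt start_cap dependencies
instance (start_cap : String) (dependencies : List (List (String × String))) (out : List String) : Decidable (Spec_extract_relevant_subgraph_py start_cap dependencies out) := by unfold Spec_extract_relevant_subgraph_py; infer_instance

-- ===== CLAIM (what is proved, stated in full; the proofs are below) =====
def Claim_equal_extract_relevant_subgraph_py : Prop := ∀ (start_cap : String) (dependencies : List (List (String × String))), Dom_extract_relevant_subgraph_py start_cap dependencies → Pre_extract_relevant_subgraph_py start_cap dependencies → Spec_extract_relevant_subgraph_py start_cap dependencies (extract_relevant_subgraph_py start_cap dependencies)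

-- ===== LEMMAS AND PROOFS =====

-- the per-node neighbour list, read off the dependency list
def pvNbrs (dependencies : List (List (String × String))) (node : String) : List String :=
  dependencies.filterMap (fun dep =>
    match pvKey dep "from", pvKey dep "to" with
    | some f, some t => if f = node then some t else none
    | _, _ => none)

-- the order-preserving "append if new" fold both loops reduce to
def pvStep (acc : List String) (t : String) : List String :=
  if t ∈ acc then acc else acc ++ [t]

theorem pvBuild_graph_getD (dependencies : List (List (String × String)))
    (hpre : ∀ dep ∈ dependencies, (PySem.Dict.mk dep).contains "from" = true ∧
      (PySem.Dict.mk dep).contains "to" = true) :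
    ∀ (g : PySem.Dict String (List String)) (ns : PySem.Set String) (node : String),
      ((dependencies.foldl (fun acc dep =>
        match pvKey dep "from", pvKey dep "to" with
        | some f, some t =>
            (acc.1.modify f [] (· ++ [t]), PySem.Set.add (PySem.Set.add acc.2 f) t)
        | _, _ => acc) (g, ns)).1).getD node []
      = g.getD node [] ++ pvNbrs dependencies node := by
  induction dependencies with
  | nil => intro g ns node; simp [pvNbrs]
  | cons dep rest ih =>
    intro g ns node
    obtain ⟨hf, ht⟩ := hpre dep (by simp)
    rw [PySem.Dict.contains_eq_isSome_get?] at hf ht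
    obtain ⟨f, hf⟩ := Option.isSome_iff_exists.mp hf
    obtain ⟨t, ht⟩ := Option.isSome_iff_exists.mp ht
    have hf' : pvKey dep "from" = some f := hf
    have ht' : pvKey dep "to" = some t := ht
    simp only [List.foldl_cons, hf', ht', pvNbrs, List.filterMap_cons]
    rw [ih (fun d hd => hpre d (by simp [hd]))]
    rw [PySem.Dict.getD_modify]
    by_cases hn : node = f
    · subst hn; simp [pvNbrs]
    · rw [if_neg (Ne.symm hn)]
      simp [pvNbrs, hn]

theorem pvBuild_nodes_mono (dependencies : List (List (String × String))) :
    ∀ (g : PySem.Dict String (List String)) (ns : PySem.Set String) (x : String),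
      x ∈ ns →
      x ∈ (dependencies.foldl (fun acc dep =>
        match pvKey dep "from", pvKey dep "to" with
        | some f, some t =>
            (acc.1.modify f [] (· ++ [t]), PySem.Set.add (PySem.Set.add acc.2 f) t)
        | _, _ => acc) (g, ns)).2 := by
  induction dependencies with
  | nil => intro g ns x hx; simpa using hx
  | cons dep rest ih =>
    intro g ns x hx
    simp only [List.foldl_cons]
    cases hf : pvKey dep "from" <;> cases ht : pvKey dep "to" <;>
      simp only [hf, ht] <;>
      first
        | exact ih _ _ _ hx
        | exact ih _ _ _ (by simp [PySem.Set.mem_add, hx])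

theorem pvBuild_from_mem (dependencies : List (List (String × String)))
    (hpre : ∀ dep ∈ dependencies, (PySem.Dict.mk dep).contains "from" = true ∧
      (PySem.Dict.mk dep).contains "to" = true) :
    ∀ (g : PySem.Dict String (List String)) (ns : PySem.Set String)
      (dep : List (String × String)) (f : String), dep ∈ dependencies →
      pvKey dep "from" = some f →
      f ∈ (dependencies.foldl (fun acc dep =>
        match pvKey dep "from", pvKey dep "to" with
        | some f, some t =>
            (acc.1.modify f [] (· ++ [t]), PySem.Set.add (PySem.Set.add acc.2 f) t)
        | _, _ => acc) (g, ns)).2 := by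
  induction dependencies with
  | nil => intro _ _ _ _ h; simp at h
  | cons dep0 rest ih =>
    intro g ns dep f hmem hf
    simp only [List.foldl_cons]
    rcases List.mem_cons.mp hmem with rfl | hmem'
    · obtain ⟨-, ht⟩ := hpre dep (by simp)
      rw [PySem.Dict.contains_eq_isSome_get?] at ht
      obtain ⟨t, ht⟩ := Option.isSome_iff_exists.mp ht
      have ht' : pvKey dep "to" = some t := ht
      rw [hf, ht']
      exact pvBuild_nodes_mono rest _ _ f (by simp [PySem.Set.mem_add])
    · cases hf0 : pvKey dep0 "from" <;> cases ht0 : pvKey dep0 "to" <;>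
        simp only [hf0, ht0] <;>
        exact ih (fun d hd => hpre d (by simp [hd])) _ _ dep f hmem' hf

-- B's inner scan over the dependency list is the pvStep fold over the neighbour list
theorem inner_scan_eq (dependencies : List (List (String × String))) (node : String) :
    ∀ acc : List String,
      dependencies.foldl (fun acc dep =>
        match pvKey dep "from", pvKey dep "to" with
        | some f, some t => if f = node ∧ t ∉ acc then acc ++ [t] else acc
        | _, _ => acc) acc
      = (pvNbrs dependencies node).foldl pvStep acc := by
  induction dependencies with
  | nil => intro acc; simp [pvNbrs]
  | cons dep rest ih =>
    intro acc
    simp only [List.foldl_cons, pvNbrs, List.filterMap_cons]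
    cases hf : pvKey dep "from" <;> cases ht : pvKey dep "to" <;>
      simp only [hf, ht]
    · exact ih acc
    · exact ih acc
    · exact ih acc
    · rename_i f t
      by_cases hfn : f = node
      · subst hfn
        by_cases hm : t ∈ acc <;>
          simp [pvNbrs, hm, pvStep, List.foldl_cons, ih]
      · simp [pvNbrs, hfn, ih]

-- the pvStep fold only appends
theorem foldS_prefix (ns : List String) :
    ∀ vis : List String, ∃ e, ns.foldl pvStep vis = vis ++ e := by
  induction ns with
  | nil => intro vis; exact ⟨[], by simp⟩
  | cons n rest ih =>
    intro vis
    simp only [List.foldl_cons, pvStep]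
    by_cases hm : n ∈ vis
    · simpa [hm] using ih vis
    · obtain ⟨e, he⟩ := ih (vis ++ [n])
      exact ⟨[n] ++ e, by simp [hm, he]⟩

-- the pvStep fold keeps the list duplicate-free
theorem foldS_nodup (ns : List String) :
    ∀ vis : List String, vis.Nodup → (ns.foldl pvStep vis).Nodup := by
  induction ns with
  | nil => intro vis h; simpa using h
  | cons n rest ih =>
    intro vis h
    simp only [List.foldl_cons, pvStep]
    by_cases hm : n ∈ vis
    · simpa [hm] using ih vis h
    · rw [if_neg hm]
      refine ih _ ?_
      rw [List.nodup_append]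
      refine ⟨h, List.nodup_singleton n, fun a ha b hb => ?_⟩
      rw [List.mem_singleton] at hb
      exact fun he => hm (hb ▸ he ▸ ha)

-- A's paired (visited, queue) fold is the pvStep fold with the new elements also queued
theorem pair_fold (ns : List String) :
    ∀ (vis : PySem.Set String) (q : List String),
      ns.foldl (fun (st : PySem.Set String × List String) neighbor =>
          if neighbor ∈ st.1 then st else (PySem.Set.add st.1 neighbor, st.2 ++ [neighbor]))
        (vis, q)
      = (ns.foldl pvStep vis, q ++ (ns.foldl pvStep vis).drop vis.length) := by
  induction ns with
  | nil => intro vis q; simp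
  | cons n rest ih =>
    intro vis q
    simp only [List.foldl_cons, pvStep]
    by_cases hm : n ∈ vis
    · simpa [hm] using ih vis q
    · rw [if_neg hm, if_neg hm, PySem.Set.add_of_not_mem hm, ih (vis ++ [n]) (q ++ [n])]
      obtain ⟨e, he⟩ := foldS_prefix rest (vis ++ [n])
      rw [he]
      simp [List.drop_append, List.drop_append]

-- bisimulation: BFS over the built graph with queue = visited.drop i IS the worklist scan
theorem bisim (dependencies : List (List (String × String)))
    (hpre : ∀ dep ∈ dependencies, (PySem.Dict.mk dep).contains "from" = true ∧
      (PySem.Dict.mk dep).contains "to" = true) :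
    ∀ (fuel : Nat) (vis : List String) (i : Nat), i ≤ vis.length →
      pvBfs (pvBuild dependencies).1 fuel vis (vis.drop i)
      = pvScan dependencies fuel vis i := by
  intro fuel
  induction fuel with
  | zero => intro vis i _; rfl
  | succ f ih =>
    intro vis i hi
    by_cases h : i < vis.length
    · have hdrop : vis.drop i = vis[i] :: vis.drop (i + 1) :=
        List.drop_eq_getElem_cons h
      rw [hdrop]
      show pvBfs (pvBuild dependencies).1 (f + 1) vis (vis[i] :: vis.drop (i + 1))
        = pvScan dependencies (f + 1) vis i
      rw [pvBfs, pvScan]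
      rw [dif_pos h]
      have hg : ((pvBuild dependencies).1).getD vis[i] [] = pvNbrs dependencies vis[i] := by
        have := pvBuild_graph_getD dependencies hpre PySem.Dict.empty PySem.Set.empty vis[i]
        simpa [pvBuild] using this
      rw [inner_scan_eq]
      simp only [hg]
      rw [pair_fold]
      obtain ⟨e, he⟩ := foldS_prefix (pvNbrs dependencies vis[i]) vis
      set vis' := (pvNbrs dependencies vis[i]).foldl pvStep vis with hvis'
      have hq : vis.drop (i + 1) ++ vis'.drop vis.length = vis'.drop (i + 1) := by
        rw [he, List.drop_append, List.drop_append]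
        simp [Nat.sub_eq_zero_of_le, h]
      rw [hq]
      exact ih vis' (i + 1) (by rw [he]; simp; omega)
    · have hdrop : vis.drop i = [] := List.drop_eq_nil_of_le (by omega)
      rw [hdrop]
      show pvBfs (pvBuild dependencies).1 (f + 1) vis [] = pvScan dependencies (f + 1) vis i
      rw [pvScan, dif_neg h]
      rfl

-- the worklist stays duplicate-free
theorem pvScan_nodup (dependencies : List (List (String × String))) :
    ∀ (fuel : Nat) (vis : List String) (i : Nat), vis.Nodup →
      (pvScan dependencies fuel vis i).Nodup := by
  intro fuel
  induction fuel with
  | zero => intro vis i h; exact h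
  | succ f ih =>
    intro vis i h
    rw [pvScan]
    by_cases hlt : i < vis.length
    · rw [dif_pos hlt, inner_scan_eq]
      exact ih _ _ (foldS_nodup _ _ h)
    · rw [dif_neg hlt]; exact h

-- a start node with no outgoing edge: the scan stops after one pass
theorem pvScan_isolated (dependencies : List (List (String × String))) (s : String)
    (hno : pvNbrs dependencies s = []) :
    ∀ f : Nat, pvScan dependencies (f + 1) [s] 0 = [s] := by
  intro f
  rw [pvScan, dif_pos (by simp)]
  have : (dependencies.foldl (fun acc dep =>
      match pvKey dep "from", pvKey dep "to" with
      | some f, some t => if f = [s][0] ∧ t ∉ acc then acc ++ [t] else acc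
      | _, _ => acc) [s]) = [s] := by
    rw [inner_scan_eq]
    simp only [List.getElem_singleton, hno, List.foldl_nil]
  rw [this]
  cases f with
  | zero => rfl
  | succ f' => rw [pvScan, dif_neg (by simp)]

-- ===== VERDICT (by name: the statement is the Claim_ definition above) =====
theorem extract_relevant_subgraph_py_spec : Claim_equal_extract_relevant_subgraph_py := by
  intro start_cap dependencies _ hpre
  unfold Spec_extract_relevant_subgraph_py
  unfold extract_relevant_subgraph_py extract_relevant_subgraph_py_alt
  have hstart : PySem.Set.add PySem.Set.empty start_cap = [start_cap] := by
    simp [PySem.Set.add_of_not_mem, PySem.Set.empty]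
  by_cases hmem : start_cap ∈ (pvBuild dependencies).2
  · simp only [hstart, if_pos hmem]
    have := bisim dependencies hpre (dependencies.length + 1) [start_cap] 0 (by simp)
    simp only [List.drop_zero] at this
    rw [this]
    exact (PySem.Set.ofList_eq_self_of_nodup _
      (pvScan_nodup dependencies (dependencies.length + 1) [start_cap] 0
        (List.nodup_singleton start_cap))).symm
  · simp only [hstart, if_neg hmem]
    have hno : pvNbrs dependencies start_cap = [] := by
      rw [pvNbrs, List.filterMap_eq_nil_iff]
      intro dep hdep
      cases hf : pvKey dep "from" with
      | none => simp [hf]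
      | some f =>
        cases ht : pvKey dep "to" with
        | none => simp [hf, ht]
        | some t =>
          have hfmem : f ∈ (pvBuild dependencies).2 :=
            pvBuild_from_mem dependencies hpre PySem.Dict.empty PySem.Set.empty dep f hdep hf
          have hne : f ≠ start_cap := fun he => hmem (he ▸ hfmem)
          simp [hf, ht, hne]
    rw [pvScan_isolated dependencies start_cap hno dependencies.length]
    exact (PySem.Set.ofList_eq_self_of_nodup [start_cap] (List.nodup_singleton start_cap)).symm
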